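-- pv_equiv track=rewrite | github.com/lfsssequeira/vibecoding-cursor-streamlit | app_review_scraper.py | group_reviews_by_rating
-- ===== SOURCE A (Python) =====
-- def group_reviews_by_rating(reviews):
--     """
--     Group reviews by their rating (1-5 stars)
--     """
--     grouped = {}
--     for review in reviews:
--         rating = review["rating"]
--         if rating not in grouped:
--             grouped[rating] = []
--         grouped[rating].append(review)
--
--     # Sort ratings from 5 to 1 (best to worst)
--     return dict(sorted(grouped.items(), reverse=True))
-- ===== SOURCE B (Python) =====
-- def group_reviews_by_rating(reviews):
--     """
--     Group reviews by their rating (1-5 stars)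
--     """
--     ratings = sorted({review["rating"] for review in reviews}, reverse=True)
--     return {q: [r for r in reviews if r["rating"] == q] for q in ratings}
-- ===== Notes on version B (the rewrite author's own statement) =====
-- stated objective: alternative
-- what changed: B first computes the distinct ratings as a set and sorts them descending, then builds the result with one filter pass per rating (a dict comprehension), instead of A's single append-into-dict pass followed by sorting the dict items.
import Mathlib
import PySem

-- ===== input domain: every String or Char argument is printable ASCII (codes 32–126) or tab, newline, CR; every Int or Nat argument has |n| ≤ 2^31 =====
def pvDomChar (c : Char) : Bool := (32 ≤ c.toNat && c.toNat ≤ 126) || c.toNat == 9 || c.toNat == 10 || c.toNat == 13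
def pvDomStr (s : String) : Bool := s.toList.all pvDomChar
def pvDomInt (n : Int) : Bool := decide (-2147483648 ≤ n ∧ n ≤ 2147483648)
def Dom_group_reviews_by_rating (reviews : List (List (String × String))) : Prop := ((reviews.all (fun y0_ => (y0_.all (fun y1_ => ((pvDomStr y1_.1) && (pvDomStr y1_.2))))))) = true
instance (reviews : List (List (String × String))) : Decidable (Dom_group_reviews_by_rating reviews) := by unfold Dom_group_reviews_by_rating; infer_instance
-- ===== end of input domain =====

-- B collects the distinct ratings, sorts them descending, and builds each group by a filter pass,
-- instead of A's append-into-dict pass followed by sorting the items; return values only (neither mutates its argument).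


-- ===== PORT A =====
-- review["rating"] (a dict lookup); total form with default "" — Pre_ guarantees the key is present
def pvRating (r : List (String × String)) : String := (PySem.Dict.mk r).getD "rating" ""

def group_reviews_by_rating (reviews : List (List (String × String))) : List (String × List (List (String × String))) :=
  let grouped := reviews.foldl (fun g review =>
    let rating := pvRating review
    -- if rating not in grouped: grouped[rating] = []
    let g := if g.contains rating = true then g else g.insert rating []
    -- grouped[rating].append(review)
    g.modify rating [] (fun v => v ++ [review])) PySem.Dict.empty
  -- sorted(grouped.items(), reverse=True): dict keys are distinct, so Python's tuple
  -- comparison never reaches the second component — it sorts by the key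
  PySem.List.sorted grouped.items (fun p => p.1) true

-- ===== PORT B =====
def group_reviews_by_rating_alt (reviews : List (List (String × String))) : List (String × List (List (String × String))) :=
  -- ratings = sorted({review["rating"] for review in reviews}, reverse=True)
  let ratings := PySem.List.sorted (PySem.Set.ofList (reviews.map pvRating)) (fun x => x) true
  -- {q: [r for r in reviews if r["rating"] == q] for q in ratings}
  ratings.map (fun q => (q, reviews.filter (fun r => pvRating r == q)))

-- ===== PRECONDITION & SPEC =====
-- Pre_ excludes exactly the inputs where Python's A raises KeyError: a review without a "rating" key.
def Pre_group_reviews_by_rating (reviews : List (List (String × String))) : Prop :=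
  ∀ r ∈ reviews, (PySem.Dict.mk r).contains "rating" = true
instance (reviews : List (List (String × String))) : Decidable (Pre_group_reviews_by_rating reviews) := by unfold Pre_group_reviews_by_rating; infer_instance

def pvWitness_group_reviews_by_rating : (List (List (String × String))) :=
  [[("rating", "5"), ("text", "good")], [("rating", "1"), ("text", "bad")], [("rating", "5"), ("text", "ok")]]

def Spec_group_reviews_by_rating (reviews : List (List (String × String))) (out : List (String × List (List (String × String)))) : Prop := out = group_reviews_by_rating_alt reviews
instance (reviews : List (List (String × String))) (out : List (String × List (List (String × String)))) : Decidable (Spec_group_reviews_by_rating reviews out) := by unfold Spec_group_reviews_by_rating; infer_instance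

-- ===== CLAIM (what is proved, stated in full; the proofs are below) =====
def Claim_equal_group_reviews_by_rating : Prop := ∀ (reviews : List (List (String × String))), Dom_group_reviews_by_rating reviews → Pre_group_reviews_by_rating reviews → Spec_group_reviews_by_rating reviews (group_reviews_by_rating reviews)

-- ===== LEMMAS AND PROOFS =====

-- A's guarded step ('if not in: insert []' then append) equals the plain modify step
theorem pv_stepA_eq (g : PySem.Dict String (List (List (String × String)))) (k : String)
    (f : List (List (String × String)) → List (List (String × String))) :
    (if g.contains k = true then g else g.insert k []).modify k [] f = g.modify k [] f := by
  by_cases h : g.contains k = true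
  · simp [h]
  · have hg : g.getD k ([] : List (List (String × String))) = [] :=
      PySem.Dict.getD_of_not_contains g _ (by simpa using h)
    simp [h, PySem.Dict.modify, PySem.Dict.getD_insert_self, PySem.Dict.insert_insert_self, hg]

-- A's grouping fold, named
def pvF (l : List (List (String × String))) : PySem.Dict String (List (List (String × String))) :=
  l.foldl (fun g review => g.modify (pvRating review) [] (fun v => v ++ [review])) PySem.Dict.empty

-- characterisation of A's dict: its items are the first-occurrence-ordered distinct ratings,
-- each paired with the filter of the input on that rating
theorem pv_items_F (l : List (List (String × String))) :
    (pvF l).items =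
      (PySem.List.dedup (l.map pvRating)).map (fun q => (q, l.filter (fun r => pvRating r == q))) := by
  have hnd : (pvF l).keys.Nodup :=
    PySem.Dict.nodup_keys_foldl_modify_key l pvRating [] (fun _ x => (fun v => v ++ [x])) _
      (by simp [PySem.Dict.keys_empty])
  have hk : (pvF l).keys = PySem.List.dedup (l.map pvRating) := by
    rw [show (pvF l).keys = PySem.Set.update PySem.Dict.empty.keys (l.map pvRating) from
      PySem.Dict.keys_foldl_modify_key l pvRating [] (fun _ x => (fun v => v ++ [x])) _]
    rw [PySem.List.dedup_eq_ofList, PySem.Dict.keys_empty]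
    rfl
  have hg : ∀ q, (pvF l).getD q [] = l.filter (fun r => pvRating r == q) := by
    intro q
    have hF : pvF l = (l.map (fun r => (pvRating r, r))).foldl
        (fun d p => d.modify p.1 [] (fun v => v ++ [p.2])) PySem.Dict.empty := by
      rw [List.foldl_map]
      rfl
    rw [hF, PySem.Dict.getD_foldl_modify_append, List.filter_map]
    simp [Function.comp_def]
  rw [PySem.Dict.items_eq_map_keys _ hnd [], hk]
  exact List.map_congr_left (fun q _ => by rw [hg q])

-- B's key list is strictly descending
theorem pv_keys_sorted_desc (M : List String) :
    (PySem.List.sorted (PySem.Set.ofList M) (fun x => x) true).Pairwise (fun a b => b < a) := by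
  have hpw : (PySem.List.sorted (PySem.Set.ofList M) (fun x => x) true).Pairwise (fun a b => b ≤ a) :=
    PySem.List.sorted_pairwise_rev _ _
  have hnd : (PySem.List.sorted (PySem.Set.ofList M) (fun x => x) true).Nodup :=
    (PySem.List.sorted_perm _ _ _).nodup_iff.mpr (PySem.Set.nodup_ofList M)
  exact (hpw.and hnd).imp (fun h => lt_of_le_of_ne h.1 (Ne.symm h.2))

-- ===== VERDICT (by name: the statement is the Claim_ definition above) =====
theorem group_reviews_by_rating_spec : Claim_equal_group_reviews_by_rating := by
  intro reviews _ _
  unfold Spec_group_reviews_by_rating group_reviews_by_rating group_reviews_by_rating_alt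
  simp only [pv_stepA_eq]
  show PySem.List.sorted (pvF reviews).items (fun p => p.1) true
      = (PySem.List.sorted (PySem.Set.ofList (reviews.map pvRating)) (fun x => x) true).map
          (fun q => (q, reviews.filter (fun r => pvRating r == q)))
  rw [pv_items_F]
  apply PySem.List.sorted_rev_eq_of_perm_of_pairwise_gt
  · exact ((PySem.List.sorted_perm _ _ _).trans
      (by rw [PySem.List.dedup_eq_ofList])).map _
  · exact List.Pairwise.map _ (fun a b h => h)
      (pv_keys_sorted_desc (reviews.map pvRating))
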